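-- pv_equiv track=rewrite | github.com/B-A-P-A-LLI-K-A/-the-source-of-Daunism | варики/бахтиев_1/21.py | f
-- ===== SOURCE A (Python) =====
-- def f(s, h, sp):
--     if s >= 54:
--         if h in sp:
--             return 1
--         else:
--             return 0
--     elif h > max(sp):
--         return 0
--     else:
--         if h % 2 == 0:
--             return f(s + 2, h + 1, sp) and f(s * 2, h + 1, sp)
--         else:
--             return f(s + 2, h + 1, sp) or f(s * 2, h + 1, sp)
-- ===== SOURCE B (Python) =====
-- def f(s, h, sp):
--     # top-down DP: memoize results per (s, h) state; cache bounded to keep memory flat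
--     CACHE_LIMIT = 200000
--     memo = {}
--
--     def go(s, h):
--         v = memo.get((s, h))
--         if v is None:
--             if s >= 54:
--                 v = 1 if h in sp else 0
--             elif h > max(sp):
--                 v = 0
--             else:
--                 a = go(s + 2, h + 1)
--                 if h % 2 == 0:
--                     v = a and go(s * 2, h + 1)
--                 else:
--                     v = a or go(s * 2, h + 1)
--             if len(memo) < CACHE_LIMIT:
--                 memo[(s, h)] = v
--         return v
--
--     return go(s, h)
-- ===== Notes on version B (the rewrite author's own statement) =====
-- stated objective: alternative
-- what changed: B replaces A's plain AND/OR recursion by top-down dynamic programming: a size-bounded dict memoizing the result per (s,h) state, so repeated states are not re-evaluated while the cache has room; short-circuit evaluation is kept.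
import Mathlib
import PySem

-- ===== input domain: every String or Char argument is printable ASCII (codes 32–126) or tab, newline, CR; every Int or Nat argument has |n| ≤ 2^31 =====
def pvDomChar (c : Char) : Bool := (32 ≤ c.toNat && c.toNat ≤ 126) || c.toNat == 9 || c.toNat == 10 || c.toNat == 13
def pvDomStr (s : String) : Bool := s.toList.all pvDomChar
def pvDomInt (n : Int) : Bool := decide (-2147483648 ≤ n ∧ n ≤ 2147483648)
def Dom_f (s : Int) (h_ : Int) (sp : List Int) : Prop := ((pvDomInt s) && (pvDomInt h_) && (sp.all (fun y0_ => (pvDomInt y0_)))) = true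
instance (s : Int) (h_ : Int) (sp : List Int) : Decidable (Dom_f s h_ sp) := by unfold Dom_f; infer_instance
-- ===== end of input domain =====

-- B memoizes the recursion on (s,h) states in a dict (top-down DP), keeping A's short-circuit `and`/`or`; alternative structure, no measured speed claim.

-- termination measure lemma, cited by name in decreasing_by of both ports
lemma pvMeasureLt {M h_ : Int} (hM : ¬ M < h_) : (M + 1 - (h_ + 1)).toNat < (M + 1 - h_).toNat := by
  simp only [not_lt] at hM
  omega

-- ===== PORT A =====
-- Literal port of A; `x and y`/`x or y` are Python's value-returning short-circuit forms
-- (return the first operand when it decides, else the second); max(sp) on empty sp raises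
-- in Python, so sp = [] with s < 54 is outside Pre_f (here the port uses .getD 0 there).
def f (s : Int) (h_ : Int) (sp : List Int) : Int :=
  if 54 ≤ s then
    (if h_ ∈ sp then 1 else 0)
  else if hM : ((PySem.List.max? sp (fun x => x)).getD 0) < h_ then
    0
  else
    let a := f (s + 2) (h_ + 1) sp
    if PySem.Int.mod h_ 2 = 0 then
      (if a = 0 then a else f (s * 2) (h_ + 1) sp)
    else
      (if a ≠ 0 then a else f (s * 2) (h_ + 1) sp)
termination_by (((PySem.List.max? sp (fun x => x)).getD 0 + 1 - h_).toNat)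
decreasing_by all_goals exact pvMeasureLt hM

-- ===== PORT B =====
-- Source B's bounded cache write: `if len(memo) < CACHE_LIMIT: memo[(s,h)] = v`
def insertIfRoom (memo : PySem.Dict (Int × Int) Int) (k : Int × Int) (v : Int) :
    PySem.Dict (Int × Int) Int :=
  if memo.size < 200000 then memo.insert k v else memo

-- go from Source B: memo threaded explicitly (Python mutates the closed-over dict).
def goMemo (sp : List Int) (memo : PySem.Dict (Int × Int) Int) (s : Int) (h_ : Int) :
    Int × PySem.Dict (Int × Int) Int :=
  match memo.get? (s, h_) with
  | some v => (v, memo)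
  | none =>
    if 54 ≤ s then
      let v : Int := if h_ ∈ sp then 1 else 0
      (v, insertIfRoom memo (s, h_) v)
    else if hM : ((PySem.List.max? sp (fun x => x)).getD 0) < h_ then
      (0, insertIfRoom memo (s, h_) (0 : Int))
    else
      let r1 := goMemo sp memo (s + 2) (h_ + 1)
      if PySem.Int.mod h_ 2 = 0 then
        if r1.1 = 0 then (r1.1, insertIfRoom r1.2 (s, h_) r1.1)
        else
          let r2 := goMemo sp r1.2 (s * 2) (h_ + 1)
          (r2.1, insertIfRoom r2.2 (s, h_) r2.1)
      else
        if r1.1 ≠ 0 then (r1.1, insertIfRoom r1.2 (s, h_) r1.1)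
        else
          let r2 := goMemo sp r1.2 (s * 2) (h_ + 1)
          (r2.1, insertIfRoom r2.2 (s, h_) r2.1)
termination_by (((PySem.List.max? sp (fun x => x)).getD 0 + 1 - h_).toNat)
decreasing_by all_goals exact pvMeasureLt hM

def f_alt (s : Int) (h_ : Int) (sp : List Int) : Int :=
  (goMemo sp PySem.Dict.empty s h_).1

-- ===== PRECONDITION & SPEC =====
-- Pre_f excludes exactly sp = [] with s < 54, where Python's max(sp) raises ValueError (in both A and B).
def Pre_f (s : Int) (h_ : Int) (sp : List Int) : Prop := sp ≠ [] ∨ 54 ≤ s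
instance (s : Int) (h_ : Int) (sp : List Int) : Decidable (Pre_f s h_ sp) := by unfold Pre_f; infer_instance
def pvWitness_f : Int × Int × List Int := (0, 0, [3])
def Spec_f (s : Int) (h_ : Int) (sp : List Int) (out : Int) : Prop := out = f_alt s h_ sp
instance (s : Int) (h_ : Int) (sp : List Int) (out : Int) : Decidable (Spec_f s h_ sp out) := by unfold Spec_f; infer_instance

-- ===== CLAIM (what is proved, stated in full; the proofs are below) =====
def Claim_equal_f : Prop := ∀ (s : Int) (h_ : Int) (sp : List Int), Dom_f s h_ sp → Pre_f s h_ sp → Spec_f s h_ sp (f s h_ sp)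

-- ===== LEMMAS AND PROOFS =====

-- memo invariant: every entry stores the value of the plain recursion f
def MemoOK (sp : List Int) (memo : PySem.Dict (Int × Int) Int) : Prop :=
  ∀ p v, memo.get? p = some v → v = f p.1 p.2 sp

lemma memoOK_insert {sp : List Int} {memo : PySem.Dict (Int × Int) Int} {s h_ : Int} {v : Int}
    (hm : MemoOK sp memo) (hv : v = f s h_ sp) : MemoOK sp (memo.insert (s, h_) v) := by
  intro p w hw
  rw [PySem.Dict.get?_insert] at hw
  split at hw
  · rename_i hp
    cases hw
    subst hp
    exact hv
  · exact hm p w hw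

lemma memoOK_insertIfRoom {sp : List Int} {memo : PySem.Dict (Int × Int) Int} {s h_ : Int} {v : Int}
    (hm : MemoOK sp memo) (hv : v = f s h_ sp) : MemoOK sp (insertIfRoom memo (s, h_) v) := by
  unfold insertIfRoom
  split
  · exact memoOK_insert hm hv
  · exact hm

lemma goMemo_correct (sp : List Int) :
    ∀ (n : Nat) (memo : PySem.Dict (Int × Int) Int) (s h_ : Int),
    (((PySem.List.max? sp (fun x => x)).getD 0 + 1 - h_).toNat ≤ n) → MemoOK sp memo →
    (goMemo sp memo s h_).1 = f s h_ sp ∧ MemoOK sp (goMemo sp memo s h_).2 := by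
  intro n
  induction n with
  | zero =>
    intro memo s h_ hn hm
    rw [goMemo]
    cases hget : memo.get? (s, h_) with
    | some v => exact ⟨hm _ v hget, hm⟩
    | none =>
      by_cases hs : (54 : Int) ≤ s
      · simp only [if_pos hs]
        have hv : (if h_ ∈ sp then (1 : Int) else 0) = f s h_ sp := by rw [f]; simp [hs]
        exact ⟨hv, memoOK_insertIfRoom hm hv⟩
      · by_cases hM : ((PySem.List.max? sp (fun x => x)).getD 0) < h_
        · simp only [if_neg hs, dif_pos hM]
          have hv : (0 : Int) = f s h_ sp := by rw [f]; simp [hs, hM]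
          exact ⟨hv, memoOK_insertIfRoom hm hv⟩
        · exfalso; simp only [not_lt] at hM; omega
  | succ n ih =>
    intro memo s h_ hn hm
    rw [goMemo]
    cases hget : memo.get? (s, h_) with
    | some v => exact ⟨hm _ v hget, hm⟩
    | none =>
      by_cases hs : (54 : Int) ≤ s
      · simp only [if_pos hs]
        have hv : (if h_ ∈ sp then (1 : Int) else 0) = f s h_ sp := by rw [f]; simp [hs]
        exact ⟨hv, memoOK_insertIfRoom hm hv⟩
      · by_cases hM : ((PySem.List.max? sp (fun x => x)).getD 0) < h_
        · simp only [if_neg hs, dif_pos hM]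
          have hv : (0 : Int) = f s h_ sp := by rw [f]; simp [hs, hM]
          exact ⟨hv, memoOK_insertIfRoom hm hv⟩
        · simp only [if_neg hs, dif_neg hM]
          simp only [not_lt] at hM
          have hstep : (((PySem.List.max? sp (fun x => x)).getD 0 + 1 - (h_ + 1)).toNat ≤ n) := by omega
          obtain ⟨h1, hm1⟩ := ih memo (s + 2) (h_ + 1) hstep hm
          by_cases hp : PySem.Int.mod h_ 2 = 0
          · simp only [if_pos hp]
            by_cases hz : (goMemo sp memo (s + 2) (h_ + 1)).1 = 0
            · simp only [if_pos hz]
              have hv : (goMemo sp memo (s + 2) (h_ + 1)).1 = f s h_ sp := by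
                rw [f]
                simp only [if_neg (by omega : ¬ (54 : Int) ≤ s),
                  dif_neg (by omega : ¬ ((PySem.List.max? sp (fun x => x)).getD 0) < h_),
                  if_pos hp]
                rw [h1] at hz ⊢
                simp [hz]
              exact ⟨hv, memoOK_insertIfRoom hm1 hv⟩
            · simp only [if_neg hz]
              obtain ⟨h2, hm2⟩ := ih (goMemo sp memo (s + 2) (h_ + 1)).2 (s * 2) (h_ + 1) hstep hm1
              have hv : (goMemo sp (goMemo sp memo (s + 2) (h_ + 1)).2 (s * 2) (h_ + 1)).1 = f s h_ sp := by
                rw [f]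
                simp only [if_neg (by omega : ¬ (54 : Int) ≤ s),
                  dif_neg (by omega : ¬ ((PySem.List.max? sp (fun x => x)).getD 0) < h_),
                  if_pos hp]
                rw [h1] at hz
                simp [hz, h2]
              exact ⟨hv, memoOK_insertIfRoom hm2 hv⟩
          · simp only [if_neg hp]
            by_cases hz : (goMemo sp memo (s + 2) (h_ + 1)).1 ≠ 0
            · simp only [if_pos hz]
              have hv : (goMemo sp memo (s + 2) (h_ + 1)).1 = f s h_ sp := by
                rw [f]
                simp only [if_neg (by omega : ¬ (54 : Int) ≤ s),
                  dif_neg (by omega : ¬ ((PySem.List.max? sp (fun x => x)).getD 0) < h_),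
                  if_neg hp]
                rw [h1] at hz ⊢
                simp [hz]
              exact ⟨hv, memoOK_insertIfRoom hm1 hv⟩
            · simp only [if_neg hz]
              obtain ⟨h2, hm2⟩ := ih (goMemo sp memo (s + 2) (h_ + 1)).2 (s * 2) (h_ + 1) hstep hm1
              have hv : (goMemo sp (goMemo sp memo (s + 2) (h_ + 1)).2 (s * 2) (h_ + 1)).1 = f s h_ sp := by
                rw [f]
                simp only [if_neg (by omega : ¬ (54 : Int) ≤ s),
                  dif_neg (by omega : ¬ ((PySem.List.max? sp (fun x => x)).getD 0) < h_),
                  if_neg hp]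
                simp only [not_not] at hz
                rw [h1] at hz
                simp [hz, h2]
              exact ⟨hv, memoOK_insertIfRoom hm2 hv⟩

-- ===== VERDICT (by name: the statement is the Claim_ definition above) =====
theorem f_spec : Claim_equal_f := by
  intro s h_ sp _ _
  unfold Spec_f f_alt
  exact (goMemo_correct sp (((PySem.List.max? sp (fun x => x)).getD 0 + 1 - h_).toNat)
    PySem.Dict.empty s h_ le_rfl (by intro p v hv; simp [PySem.Dict.get?_empty] at hv)).1.symm
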